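-- pv_equiv track=rewrite | github.com/cwhiii/CWOC | test_tag_parser.py | _tag_matches_token
-- ===== SOURCE A (Python) =====
-- def _tag_matches_token(token, tag_list):
--     for t in tag_list:
--         if t == token or t.startswith(token + '/'):
--             return True
--         segments = t.split('/')
--         if token in segments:
--             return True
--     return False
-- ===== SOURCE B (Python) =====
-- def _candidates(t):
--     # everything a token could be to match tag t: one of its segments,
--     # the whole tag, or a prefix of t ending just before a '/'
--     return t.split('/') + [t] + [t[:i] for i, ch in enumerate(t) if ch == '/']
--
--
-- def _tag_matches_token(token, tag_list):
--     candidates = {c for t in tag_list for c in _candidates(t)}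
--     return token in candidates
-- ===== Notes on version B (the rewrite author's own statement) =====
-- stated objective: alternative
-- what changed: Replaces A's per-tag scan with three tests and early return by building one hash set of all candidate strings (segments, whole tags, and slash-boundary prefixes) across every tag, followed by a single set-membership test.
import Mathlib
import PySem

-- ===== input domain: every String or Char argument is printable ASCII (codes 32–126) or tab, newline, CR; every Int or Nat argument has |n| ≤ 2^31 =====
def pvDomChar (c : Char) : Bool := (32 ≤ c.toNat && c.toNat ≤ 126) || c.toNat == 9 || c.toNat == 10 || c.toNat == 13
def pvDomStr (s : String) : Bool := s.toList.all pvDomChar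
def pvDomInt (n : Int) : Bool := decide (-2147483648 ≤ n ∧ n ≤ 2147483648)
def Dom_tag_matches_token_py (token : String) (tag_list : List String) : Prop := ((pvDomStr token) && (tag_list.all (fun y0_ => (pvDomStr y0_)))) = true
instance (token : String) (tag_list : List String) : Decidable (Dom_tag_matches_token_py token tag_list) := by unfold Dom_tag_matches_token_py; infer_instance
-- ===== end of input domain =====

-- B builds one set of candidate strings (segments, whole tags, slash-boundary prefixes)
-- across all tags and does a single membership test, replacing A's per-tag early-return scan.


-- ===== PORT A =====
-- the 'for t in tag_list' loop with early return; t.split('/') has sep ≠ "", so split? is always some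
def pvTagLoopA (token : String) : List String → Bool
  | [] => false
  | t :: rest =>
    if t == token || PySem.Str.startswith t (token ++ "/") then true
    else if ((PySem.Str.split? t "/").getD []).contains token then true
    else pvTagLoopA token rest

def tag_matches_token_py (token : String) (tag_list : List String) : Bool :=
  pvTagLoopA token tag_list

-- ===== PORT B =====
-- _candidates(t) = t.split('/') + [t] + [t[:i] for i, ch in enumerate(t) if ch == '/']
def pvCandidatesB (t : String) : List String :=
  (PySem.Str.split? t "/").getD [] ++ [t] ++
    ((PySem.List.enumerate t.toList).filter (fun p => p.2 == '/')).map
      (fun p => PySem.Str.slice t none (some p.1))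

def tag_matches_token_py_alt (token : String) (tag_list : List String) : Bool :=
  PySem.Set.contains (PySem.Set.ofList (tag_list.flatMap pvCandidatesB)) token

-- ===== PRECONDITION & SPEC =====
def Spec_tag_matches_token_py (token : String) (tag_list : List String) (out : Bool) : Prop := out = tag_matches_token_py_alt token tag_list
instance (token : String) (tag_list : List String) (out : Bool) : Decidable (Spec_tag_matches_token_py token tag_list out) := by unfold Spec_tag_matches_token_py; infer_instance

-- ===== CLAIM (what is proved, stated in full; the proofs are below) =====
def Claim_equal_tag_matches_token_py : Prop := ∀ (token : String) (tag_list : List String), Dom_tag_matches_token_py token tag_list → Spec_tag_matches_token_py token tag_list (tag_matches_token_py token tag_list)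

-- ===== LEMMAS AND PROOFS =====

-- membership in enumerate, characterised by index
theorem pv_mem_enumerate {α : Type} (l : List α) (start i : Int) (c : α) :
    (i, c) ∈ PySem.List.enumerate l start ↔
      ∃ n : Nat, n < l.length ∧ i = start + n ∧ l[n]? = some c := by
  induction l generalizing start with
  | nil => simp [PySem.List.enumerate]
  | cons x t ih =>
    simp only [PySem.List.enumerate, List.mem_cons, ih, Prod.mk.injEq]
    constructor
    · rintro (⟨h1, h2⟩ | ⟨n, hn, hi, hc⟩)
      · exact ⟨0, by simp, by omega, by simp [h2]⟩
      · refine ⟨n + 1, by simp; omega, by push_cast; omega, by simpa using hc⟩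
    · rintro ⟨n, hn, hi, hc⟩
      cases n with
      | zero => left; exact ⟨by omega, by simpa using hc.symm⟩
      | succ m =>
        right
        refine ⟨m, by simp at hn; omega, by push_cast at hi ⊢; omega, by simpa using hc⟩

-- A's startswith test, characterised as: token is a prefix of t ending just before a '/'
theorem pv_startswith_char (s tk : List Char) :
    PySem.Chars.startswith s (tk ++ ['/']) = true ↔
      ∃ n : Nat, n < s.length ∧ s[n]? = some '/' ∧ tk = s.take n := by
  rw [PySem.Chars.startswith_iff]
  constructor
  · rintro ⟨r, hr⟩
    refine ⟨tk.length, ?_, ?_, ?_⟩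
    · subst hr; simp [List.length_append]
    · subst hr
      rw [List.getElem?_append_left (by simp [List.length_append])]
      rw [List.getElem?_append_right (le_refl _)]
      simp
    · subst hr
      rw [List.append_assoc, List.take_left' rfl]
  · rintro ⟨n, hn, hget, htk⟩
    refine ⟨s.drop (n + 1), ?_⟩
    have h1 : tk ++ ['/'] = s.take (n + 1) := by
      rw [List.take_add_one, htk, hget]; rfl
    rw [h1, List.take_append_drop]

-- slice t [:n] with n a natural number is take n
theorem pv_slice_take (t : String) (n : Nat) :
    (PySem.Str.slice t none (some (n : Int))).toList = t.toList.take n := by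
  simp [PySem.Chars.slice]

-- per-tag equivalence: A's three tests ↔ token among B's candidates for that tag
theorem pv_per_tag (token t : String) :
    ((t == token || PySem.Str.startswith t (token ++ "/"))
      || ((PySem.Str.split? t "/").getD []).contains token)
    = decide (token ∈ pvCandidatesB t) := by
  rw [Bool.eq_iff_iff]
  simp only [Bool.or_eq_true, beq_iff_eq, decide_eq_true_eq, List.contains_iff_mem,
    pvCandidatesB, List.mem_append, List.mem_map, List.mem_filter, List.mem_singleton]
  constructor
  · rintro ((heq | hsw) | hsplit)
    · exact Or.inl (Or.inr heq.symm)
    · simp only [PySem.Str.startswith_eq, String.toList_append] at hsw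
      have hsw' : PySem.Chars.startswith t.toList (token.toList ++ ['/']) = true := by
        simpa using hsw
      obtain ⟨n, hn, hget, htk⟩ := (pv_startswith_char t.toList token.toList).mp hsw'
      refine Or.inr ⟨((n : Int), '/'), ⟨?_, by simp⟩, ?_⟩
      · exact (pv_mem_enumerate t.toList 0 n '/').mpr ⟨n, hn, by omega, hget⟩
      · apply String.toList_inj.mp
        rw [pv_slice_take, htk]
    · exact Or.inl (Or.inl hsplit)
  · rintro ((hsplit | heq) | ⟨⟨i, ch⟩, ⟨henum, hch⟩, hslice⟩)
    · exact Or.inr hsplit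
    · exact Or.inl (Or.inl heq.symm)
    · left; right
      obtain ⟨n, hn, hi, hget⟩ := (pv_mem_enumerate t.toList 0 i ch).mp henum
      subst hch
      have hi' : i = (n : Int) := by omega
      subst hi'
      have htk : token.toList = t.toList.take n := by
        rw [← hslice, pv_slice_take]
      simp only [PySem.Str.startswith_eq, String.toList_append]
      have : PySem.Chars.startswith t.toList (token.toList ++ ['/']) = true :=
        (pv_startswith_char t.toList token.toList).mpr ⟨n, hn, hget, htk⟩
      simpa using this

-- main loop lemma
theorem pv_loop (token : String) (tag_list : List String) :
    pvTagLoopA token tag_list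
      = PySem.Set.contains (PySem.Set.ofList (tag_list.flatMap pvCandidatesB)) token := by
  induction tag_list with
  | nil => simp [pvTagLoopA, PySem.Set.ofList, PySem.Set.contains]
  | cons t rest ih =>
    have hmem : PySem.Set.contains (PySem.Set.ofList ((t :: rest).flatMap pvCandidatesB)) token
        = decide (token ∈ pvCandidatesB t ∨ token ∈ rest.flatMap pvCandidatesB) := by
      rw [Bool.eq_iff_iff, PySem.Set.contains_iff, PySem.Set.mem_ofList, decide_eq_true_eq]
      simp
    have hrest : PySem.Set.contains (PySem.Set.ofList (rest.flatMap pvCandidatesB)) token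
        = decide (token ∈ rest.flatMap pvCandidatesB) := by
      rw [Bool.eq_iff_iff, PySem.Set.contains_iff, PySem.Set.mem_ofList, decide_eq_true_eq]
    have hp := pv_per_tag token t
    rw [hmem]
    simp only [pvTagLoopA]
    rw [ih, hrest]
    cases hc1 : (t == token || PySem.Str.startswith t (token ++ "/")) <;>
      cases hc2 : (((PySem.Str.split? t "/").getD []).contains token) <;>
      rw [hc1, hc2] at hp <;> simp at hp <;> simp [hc1, hc2, hp]

-- ===== VERDICT (by name: the statement is the Claim_ definition above) =====
theorem tag_matches_token_py_spec : Claim_equal_tag_matches_token_py := by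
  intro token tag_list _
  unfold Spec_tag_matches_token_py tag_matches_token_py tag_matches_token_py_alt
  exact pv_loop token tag_list
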